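-- pv_equiv track=rewrite | github.com/mfiloramo/Python-Practice | Practice/challenges.py | vowel_uncensor
-- ===== SOURCE A (Python) =====
-- def vowel_uncensor(str_1, str_2):
--     """
--     Looks at a string (str_1) whose vowels have been censored with asterisks,
--     and a string (str_2) of the missing vowels in their respective order. It then un-censors the
--     censored string using the vowels given in the vowels list.
--     """
--     new_str = []
--     vowels = []
--     for i in str_2:
--         vowels.append(i)
--     for i in str_1:
--         if i == "*":
--             new_str.append(vowels.pop(0))  # My first practical use of the .pop() list method.
--         else:
--             new_str.append(i)
--     return "".join(new_str)
-- ===== SOURCE B (Python) =====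
-- def vowel_uncensor(str_1, str_2):
--     parts = str_1.split('*')
--     return parts[0] + "".join(v + p for p, v in zip(parts[1:], str_2))
-- ===== Notes on version B (the rewrite author's own statement) =====
-- stated objective: idiomatic
-- what changed: B replaces A's per-character loop with a manually popped vowel queue by split('*') and joining the segments interleaved with the vowels via zip.
import Mathlib
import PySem

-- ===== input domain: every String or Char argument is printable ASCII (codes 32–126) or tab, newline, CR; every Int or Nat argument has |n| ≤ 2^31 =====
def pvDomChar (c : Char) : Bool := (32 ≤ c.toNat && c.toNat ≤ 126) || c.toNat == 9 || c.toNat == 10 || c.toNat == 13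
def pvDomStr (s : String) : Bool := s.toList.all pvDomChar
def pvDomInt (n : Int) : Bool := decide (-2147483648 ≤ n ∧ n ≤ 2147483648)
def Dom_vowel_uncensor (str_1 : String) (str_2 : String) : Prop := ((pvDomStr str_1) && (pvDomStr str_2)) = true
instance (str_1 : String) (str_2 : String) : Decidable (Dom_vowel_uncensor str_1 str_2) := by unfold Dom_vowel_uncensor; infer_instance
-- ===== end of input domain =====

-- B replaces A's per-character loop with a vowel queue by split('*') + zip over the segments; same return value on Pre_.

-- ===== PORT A =====
-- A's second loop 'for i in str_1': state = (remaining vowels, new_str built in reverse)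
def vowel_uncensor_loop : List Char → List Char → List Char → List Char
  | [], _, new_str => new_str.reverse
  | c :: rest, vowels, new_str =>
    if c = '*' then
      match vowels with
      | v :: vs => vowel_uncensor_loop rest vs (v :: new_str)
      | [] => new_str.reverse   -- vowels.pop(0) raises IndexError here; excluded by Pre_
    else vowel_uncensor_loop rest vowels (c :: new_str)

def vowel_uncensor (str_1 : String) (str_2 : String) : String :=
  -- 'for i in str_2: vowels.append(i)' copies str_2's characters into the list vowels
  let vowels := str_2.toList
  String.ofList (vowel_uncensor_loop str_1.toList vowels [])

-- ===== PORT B =====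
def vowel_uncensor_alt (str_1 : String) (str_2 : String) : String :=
  let parts := PySem.Chars.splitOn str_1.toList ['*']
  String.ofList (parts.headD [] ++
    PySem.Chars.join [] (((parts.drop 1).zip str_2.toList).map (fun pv => pv.2 :: pv.1)))

-- ===== PRECONDITION & SPEC =====
-- Pre_ excludes exactly the inputs on which A raises IndexError (more '*' in str_1 than characters in str_2).
def Pre_vowel_uncensor (str_1 : String) (str_2 : String) : Prop :=
  str_1.toList.count '*' ≤ str_2.toList.length
instance (str_1 : String) (str_2 : String) : Decidable (Pre_vowel_uncensor str_1 str_2) := by unfold Pre_vowel_uncensor; infer_instance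

def pvWitness_vowel_uncensor : String × String := ("h*ll* w*rld", "eoo")

def Spec_vowel_uncensor (str_1 : String) (str_2 : String) (out : String) : Prop := out = vowel_uncensor_alt str_1 str_2
instance (str_1 : String) (str_2 : String) (out : String) : Decidable (Spec_vowel_uncensor str_1 str_2 out) := by unfold Spec_vowel_uncensor; infer_instance

-- ===== CLAIM (what is proved, stated in full; the proofs are below) =====
def Claim_equal_vowel_uncensor : Prop := ∀ (str_1 : String) (str_2 : String), Dom_vowel_uncensor str_1 str_2 → Pre_vowel_uncensor str_1 str_2 → Spec_vowel_uncensor str_1 str_2 (vowel_uncensor str_1 str_2)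

-- ===== LEMMAS AND PROOFS =====

-- proof-side simple recursion computing str_1.split('*') on a char list
def splitRecStar : List Char → List (List Char)
  | [] => [[]]
  | c :: cs => if c = '*' then [] :: splitRecStar cs else (splitRecStar cs).modifyHead (c :: ·)

lemma splitRecStar_ne_nil (cs : List Char) : splitRecStar cs ≠ [] := by
  induction cs with
  | nil => simp [splitRecStar]
  | cons c cs ih =>
      simp only [splitRecStar]
      split_ifs
      · simp
      · cases h : splitRecStar cs with
        | nil => exact absurd h ih
        | cons p ps => simp [List.modifyHead]

lemma splitOn_go_star (fuel : Nat) : ∀ (l cur : List Char) (accs : List (List Char)),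
    l.length ≤ fuel →
    PySem.Chars.splitOn.go ['*'] fuel l cur accs =
      accs.reverse ++ (splitRecStar l).modifyHead (cur.reverse ++ ·) := by
  induction fuel with
  | zero =>
      intro l cur accs h
      have : l = [] := by cases l <;> simp_all
      subst this
      simp [PySem.Chars.splitOn.go, splitRecStar]
  | succ fuel ih =>
      intro l cur accs h
      cases l with
      | nil => simp [PySem.Chars.splitOn.go, splitRecStar]
      | cons c rest =>
          simp only [PySem.Chars.splitOn.go]
          by_cases hc : c = '*'
          · subst hc
            rw [if_pos (by simp [List.isPrefixOf])]
            rw [ih _ _ _ (by simpa using Nat.le_of_succ_le_succ (by simpa using h))]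
            simp only [splitRecStar, List.modifyHead]
            cases hs : splitRecStar rest <;> simp [hs]
          · rw [if_neg (by simp [List.isPrefixOf]; exact fun e => hc e.symm)]
            rw [ih _ _ _ (by simpa using Nat.le_of_succ_le_succ (by simpa using h))]
            simp only [splitRecStar, if_neg hc]
            cases hs : splitRecStar rest with
            | nil => simp [List.modifyHead]
            | cons p ps => simp [List.modifyHead]

lemma splitOn_star (cs : List Char) :
    PySem.Chars.splitOn cs ['*'] = splitRecStar cs := by
  rw [PySem.Chars.splitOn, splitOn_go_star (cs.length+1) cs [] [] (by omega)]
  cases hs : splitRecStar cs <;> simp [hs, List.modifyHead]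

lemma join_empty_sep (ps : List (List Char)) : PySem.Chars.join [] ps = ps.flatten := by
  induction ps with
  | nil => simp [PySem.Chars.join, List.intercalate]
  | cons p ps ih => cases ps <;> simp_all [PySem.Chars.join, List.intercalate, List.intersperse]

-- what B computes from the split parts and the vowels
def glueStar (ps : List (List Char)) (vs : List Char) : List Char :=
  ps.headD [] ++ (((ps.drop 1).zip vs).map (fun pv => pv.2 :: pv.1)).flatten

lemma vowel_uncensor_loop_spec : ∀ (cs vs acc : List Char),
    cs.count '*' ≤ vs.length →
    vowel_uncensor_loop cs vs acc = acc.reverse ++ glueStar (splitRecStar cs) vs := by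
  intro cs
  induction cs with
  | nil => intro vs acc h; simp [vowel_uncensor_loop, splitRecStar, glueStar]
  | cons c rest ih =>
      intro vs acc h
      by_cases hc : c = '*'
      · subst hc
        cases vs with
        | nil => simp [List.count_cons] at h
        | cons v vs' =>
            simp only [vowel_uncensor_loop, if_pos rfl]
            rw [ih vs' (v :: acc) (by simp [List.count_cons] at h; omega)]
            simp only [splitRecStar, glueStar]
            cases hs : splitRecStar rest with
            | nil => exact absurd hs (splitRecStar_ne_nil rest)
            | cons p ps => simp
      · simp only [vowel_uncensor_loop, if_neg hc]
        rw [ih vs (c :: acc) (by simp [hc] at h ⊢; omega)]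
        simp only [splitRecStar, if_neg hc, glueStar]
        cases hs : splitRecStar rest with
        | nil => exact absurd hs (splitRecStar_ne_nil rest)
        | cons p ps => simp [List.modifyHead]

-- ===== VERDICT (by name: the statement is the Claim_ definition above) =====
theorem vowel_uncensor_spec : Claim_equal_vowel_uncensor := by
  intro s1 s2 _ hpre
  unfold Spec_vowel_uncensor
  simp only [vowel_uncensor, vowel_uncensor_alt, splitOn_star, join_empty_sep,
    vowel_uncensor_loop_spec _ _ _ hpre]
  simp [glueStar]
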